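-- pv_equiv track=rewrite | github.com/RC-MODULE/rumboot | scripts/extract_checks.py | count_brackets
-- ===== SOURCE A (Python) =====
-- def count_brackets(line):
--     br = 0
--     for c in line:
--         if c=='{':
--             br+=1
--         if c=='}':
--             br-=1
--     return br
-- ===== SOURCE B (Python) =====
-- def count_brackets(line):
--     # Divide and conquer: the net brace balance of a string is the sum of the
--     # balances of its two halves (balance is additive over concatenation).
--     if len(line) <= 1:
--         if line == '{':
--             return 1
--         if line == '}':
--             return -1
--         return 0
--     mid = len(line) // 2
--     return count_brackets(line[:mid]) + count_brackets(line[mid:])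
-- ===== Notes on version B (the rewrite author's own statement) =====
-- stated objective: alternative
-- what changed: Replaced the linear accumulator loop with a divide-and-conquer recursion that splits the line in half and adds the two halves' balances, using additivity of the brace balance over concatenation.
import Mathlib
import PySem

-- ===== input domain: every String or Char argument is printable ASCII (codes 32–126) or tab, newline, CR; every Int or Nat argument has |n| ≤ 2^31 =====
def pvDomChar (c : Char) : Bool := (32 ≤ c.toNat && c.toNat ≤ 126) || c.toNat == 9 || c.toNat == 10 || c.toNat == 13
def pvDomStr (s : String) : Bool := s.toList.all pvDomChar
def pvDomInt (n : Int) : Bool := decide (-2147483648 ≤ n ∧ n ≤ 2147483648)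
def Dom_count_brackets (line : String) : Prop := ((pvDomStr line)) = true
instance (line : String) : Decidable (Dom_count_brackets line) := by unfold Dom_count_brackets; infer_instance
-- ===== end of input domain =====

-- B replaces the linear accumulator loop with a divide-and-conquer recursion on string halves (objective: alternative).


-- ===== PORT A =====
-- br = 0; for c in line: if c=='{': br+=1; if c=='}': br-=1; return br
def count_brackets (line : String) : Int :=
  line.toList.foldl (fun br c =>
    let br := if c == '{' then br + 1 else br
    if c == '}' then br - 1 else br) 0

-- ===== PORT B =====
-- if len(line)<=1: return 1/-1/0; mid=len(line)//2; return f(line[:mid])+f(line[mid:])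
-- (string slices line[:mid]/line[mid:] ported as PySem.List.slice on the character list)

-- len // 2 on a (nonnegative) length, used by the port's termination proof
theorem pv_mid_eq (n : Nat) : PySem.Int.floordiv (n : Int) 2 = ((n / 2 : Nat) : Int) := by
  simp [PySem.Int.floordiv, Int.fdiv_eq_ediv]

def count_brackets_alt_go (l : List Char) : Int :=
  if l.length ≤ 1 then
    if l = ['{'] then 1 else if l = ['}'] then -1 else 0
  else
    let mid : Int := PySem.Int.floordiv (l.length : Int) 2
    count_brackets_alt_go (PySem.List.slice l none (some mid)) +
    count_brackets_alt_go (PySem.List.slice l (some mid) none)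
termination_by l.length
decreasing_by
  all_goals
    rename_i h
    simp only [pv_mid_eq, PySem.List.slice_to l (Int.natCast_nonneg _),
      PySem.List.slice_from l (Int.natCast_nonneg _), List.length_take, List.length_drop,
      Int.toNat_natCast]
    omega

def count_brackets_alt (line : String) : Int :=
  count_brackets_alt_go line.toList

-- ===== PRECONDITION & SPEC =====
def Spec_count_brackets (line : String) (out : Int) : Prop := out = count_brackets_alt line
instance (line : String) (out : Int) : Decidable (Spec_count_brackets line out) := by unfold Spec_count_brackets; infer_instance

-- ===== CLAIM (what is proved, stated in full; the proofs are below) =====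
def Claim_equal_count_brackets : Prop := ∀ (line : String), Dom_count_brackets line → Spec_count_brackets line (count_brackets line)

-- ===== LEMMAS AND PROOFS =====

-- The net balance as a closed form: count '{' minus count '}'.
def braceBal (l : List Char) : Int := (l.count '{' : Int) - (l.count '}' : Int)

theorem braceBal_append (a b : List Char) : braceBal (a ++ b) = braceBal a + braceBal b := by
  simp [braceBal, List.count_append]; ring

-- A's loop computes the balance.
theorem foldl_brackets (l : List Char) (a : Int) :
    l.foldl (fun br c =>
      let br := if c == '{' then br + 1 else br
      if c == '}' then br - 1 else br) a
    = a + braceBal l := by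
  induction l generalizing a with
  | nil => simp [braceBal]
  | cons x t ih =>
    simp only [List.foldl_cons, ih, braceBal, List.count_cons]
    by_cases h1 : x = '{' <;> by_cases h2 : x = '}' <;>
      simp_all <;> ring

-- B's divide-and-conquer computes the balance (strong induction on length).
theorem alt_go_eq_aux : ∀ (n : Nat) (l : List Char), l.length ≤ n →
    count_brackets_alt_go l = braceBal l := by
  intro n
  induction n with
  | zero =>
    intro l hl
    have : l = [] := List.length_eq_zero_iff.mp (Nat.le_zero.mp hl)
    subst this
    simp [count_brackets_alt_go, braceBal]
  | succ n ih =>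
    intro l hl
    rw [count_brackets_alt_go]
    by_cases hsmall : l.length ≤ 1
    · rw [if_pos hsmall]
      match l, hsmall with
      | [], _ => simp [braceBal]
      | [c], _ =>
        by_cases h1 : c = '{' <;> by_cases h2 : c = '}' <;>
          simp_all [braceBal]
    · rw [if_neg hsmall]
      simp only [pv_mid_eq, PySem.List.slice_to l (Int.natCast_nonneg _),
        PySem.List.slice_from l (Int.natCast_nonneg _), Int.toNat_natCast]
      rw [ih _ (by simp; omega), ih _ (by simp; omega), ← braceBal_append,
        List.take_append_drop]

theorem alt_go_eq (l : List Char) : count_brackets_alt_go l = braceBal l :=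
  alt_go_eq_aux l.length l (le_refl _)

-- ===== VERDICT (by name: the statement is the Claim_ definition above) =====
theorem count_brackets_spec : Claim_equal_count_brackets := by
  intro line _
  unfold Spec_count_brackets count_brackets count_brackets_alt
  rw [foldl_brackets, alt_go_eq, zero_add]
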